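-- pv_equiv track=rewrite | github.com/jyh4479/Daily_Algorithm | Programmers/2018kakao/[1차]프렌즈4블록.py | solution
-- ===== SOURCE A (Python) =====
-- def run_delete(m,n,board,visit):
--     ans=0
--     for i in range(m): #블록 없애기
--         for j in range(n):
--             if visit[i][j]==True:
--                 ans+=1
--                 board[i][j]="/"
--                 visit[i][j]=False
--
--     for i in range(m-2,-1,-1):#블록 내리기
--         for j in range(n):
--             if board[i][j]!="/" and board[i+1][j]=="/": #내릴수있는경우
--                 next,prev=i+1,i
--                 while next<m and board[next][j]=="/":
--                     board[prev][j],board[next][j]=board[next][j],board[prev][j] #내리기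
--                     prev,next=next,next+1
--     return ans
--
-- def check_delete(m,visit):
--     for i in range(m):
--         if True in visit[i]:return False
--     return True
--
-- def delete_block(i,j,board,visit):
--     text=board[i][j]
--     if board[i][j+1]!=text:return #4개가 완성이 안되는경우
--     if board[i+1][j]!=text:return
--     if board[i+1][j+1]!=text:return
--
--     ################## 삭제할 블록 체크
--     visit[i][j]=True
--     visit[i][j+1]=True
--     visit[i+1][j]=True
--     visit[i+1][j+1]=True
--     ##################
--     return
--
-- def solution(m, n, board):
--     map=[list(board[i]) for i in range(m)] #문자열들 리스트화
--     board=map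
--
--     visit=[[False for _ in range(n)]for _ in range(m)]
--
--     ans=0
--     while True:
--         for i in range(m-1): #없앨 블록 찾기
--             for j in range(n-1):
--                 if board[i][j]!="/":
--                     delete_block(i,j,board,visit)
--         if check_delete(m,visit):break #제거할게 없을때까지 반복
--         ans+=run_delete(m,n,board,visit)
--
--     return ans
-- ===== SOURCE B (Python) =====
-- def solution(m, n, board):
--     # '/' is the empty-cell marker (same marker the original board format reserves)
--     grid = [list(board[i]) for i in range(m)]
--     total = 0
--     while True:
--         matched = set()
--         for i in range(m - 1):
--             for j in range(n - 1):
--                 c = grid[i][j]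
--                 if c != "/" and grid[i][j + 1] == c and grid[i + 1][j] == c and grid[i + 1][j + 1] == c:
--                     matched.update(((i, j), (i, j + 1), (i + 1, j), (i + 1, j + 1)))
--         if not matched:
--             return total
--         total += len(matched)
--         for (i, j) in matched:
--             grid[i][j] = "/"
--         for j in range(n):
--             col = [grid[i][j] for i in range(m) if grid[i][j] != "/"]
--             pad = m - len(col)
--             for i in range(m):
--                 grid[i][j] = "/" if i < pad else col[i - pad]
-- ===== Notes on version B (the rewrite author's own statement) =====
-- stated objective: simpler
-- what changed: B replaces A's visit matrix + per-cell two-phase deletion and per-cell swap-down gravity loops by collecting all 2x2 matches into one set (counted with len) and rebuilding each column by filtering out empty cells and padding with the marker on top.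
-- outside the precondition, e.g. on solution(2, 3, ['//', '//']): A returns 0, B returns 0
import Mathlib
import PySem

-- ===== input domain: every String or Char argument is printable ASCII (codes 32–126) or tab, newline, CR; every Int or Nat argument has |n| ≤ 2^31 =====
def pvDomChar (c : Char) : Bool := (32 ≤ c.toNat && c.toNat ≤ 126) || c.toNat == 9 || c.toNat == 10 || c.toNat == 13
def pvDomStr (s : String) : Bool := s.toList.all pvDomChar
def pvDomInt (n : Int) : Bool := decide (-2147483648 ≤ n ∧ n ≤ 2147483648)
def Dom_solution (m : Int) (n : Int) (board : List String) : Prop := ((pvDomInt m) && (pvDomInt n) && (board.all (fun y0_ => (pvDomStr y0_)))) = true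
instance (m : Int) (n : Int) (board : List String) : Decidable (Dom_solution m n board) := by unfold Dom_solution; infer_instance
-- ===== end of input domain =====

-- B replaces A's visit-matrix marking, per-cell deletion pass and swap-down gravity by a
-- match set collected in one scan plus a per-column filter-and-pad rebuild (objective: simpler).


-- ===== PORT A =====
-- shared low-level cell access: grid[i][j] read (default d out of range) and write (no-op out of range)
def gget {α : Type} (d : α) (g : List (List α)) (i j : Nat) : α := (g.getD i []).getD j d
def gset {α : Type} (g : List (List α)) (i j : Nat) (a : α) : List (List α) :=
  g.modify i (fun row => row.set j a)

def deleteBlock (g : List (List Char)) (v : List (List Bool)) (i j : Nat) : List (List Bool) :=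
  let text := gget '/' g i j
  if gget '/' g i (j+1) ≠ text then v
  else if gget '/' g (i+1) j ≠ text then v
  else if gget '/' g (i+1) (j+1) ≠ text then v
  else gset (gset (gset (gset v i j true) i (j+1) true) (i+1) j true) (i+1) (j+1) true

def markPass (m n : Int) (g : List (List Char)) (v : List (List Bool)) : List (List Bool) :=
  (List.range (m-1).toNat).foldl (fun v i =>
    (List.range (n-1).toNat).foldl (fun v j =>
      if gget '/' g i j ≠ '/' then deleteBlock g v i j else v) v) v

def checkDelete (m : Int) (v : List (List Bool)) : Bool :=
  (List.range m.toNat).all (fun i => !((v.getD i []).contains true))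

def runDelete1 (m n : Int) (st : Int × List (List Char) × List (List Bool)) :
    Int × List (List Char) × List (List Bool) :=
  (List.range m.toNat).foldl (fun st i =>
    (List.range n.toNat).foldl (fun st j =>
      if gget false st.2.2 i j then (st.1 + 1, gset st.2.1 i j '/', gset st.2.2 i j false)
      else st) st) st

def bubble (m : Int) (j : Nat) (g : List (List Char)) (prev next : Nat) : List (List Char) :=
  if h : (next : Int) < m ∧ gget '/' g next j = '/' then
    bubble m j (gset (gset g prev j (gget '/' g next j)) next j (gget '/' g prev j)) next (next+1)
  else g
termination_by m.toNat - next
decreasing_by have := h.1; omega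

def gravPass (m n : Int) (g : List (List Char)) : List (List Char) :=
  ((List.range (m-1).toNat).reverse).foldl (fun g i =>
    (List.range n.toNat).foldl (fun g j =>
      if gget '/' g i j ≠ '/' ∧ gget '/' g (i+1) j = '/' then bubble m j g i (i+1) else g) g) g

def runDelete (m n : Int) (g : List (List Char)) (v : List (List Bool)) :
    Int × List (List Char) × List (List Bool) :=
  let st := runDelete1 m n (0, g, v)
  (st.1, gravPass m n st.2.1, st.2.2)

def loopA (m n : Int) : Nat → List (List Char) → List (List Bool) → Int → Int
  | 0, _g, _v, ans => ans
  | Nat.succ fuel, g, v, ans =>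
    let v' := markPass m n g v
    if checkDelete m v' then ans
    else
      let st := runDelete m n g v'
      loopA m n fuel st.2.1 st.2.2 (ans + st.1)

def solution (m : Int) (n : Int) (board : List String) : Int :=
  let g0 := (List.range m.toNat).map (fun i => (board.getD i "").toList)
  let v0 := (List.range m.toNat).map (fun _ => List.replicate n.toNat false)
  loopA m n (m.toNat * n.toNat + 1) g0 v0 0

-- ===== PORT B =====
def findMatches (m n : Int) (g : List (List Char)) : PySem.Set (Nat × Nat) :=
  (List.range (m-1).toNat).foldl (fun S i =>
    (List.range (n-1).toNat).foldl (fun S j =>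
      let c := gget '/' g i j
      if c ≠ '/' ∧ gget '/' g i (j+1) = c ∧ gget '/' g (i+1) j = c ∧ gget '/' g (i+1) (j+1) = c then
        PySem.Set.add (PySem.Set.add (PySem.Set.add (PySem.Set.add S (i, j)) (i, j+1)) (i+1, j)) (i+1, j+1)
      else S) S) PySem.Set.empty

def blankCells (g : List (List Char)) (ps : List (Nat × Nat)) : List (List Char) :=
  ps.foldl (fun g p => gset g p.1 p.2 '/') g

def dropColumns (m n : Int) (g : List (List Char)) : List (List Char) :=
  (List.range n.toNat).foldl (fun g j =>
    let col := ((List.range m.toNat).map (fun i => gget '/' g i j)).filter (fun c => c ≠ '/')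
    let pad := m.toNat - col.length
    (List.range m.toNat).foldl (fun g i =>
      gset g i j (if i < pad then '/' else col.getD (i - pad) '/')) g) g

def loopB (m n : Int) : Nat → List (List Char) → Int → Int
  | 0, _g, total => total
  | Nat.succ fuel, g, total =>
    let S := findMatches m n g
    if S.isEmpty then total
    else loopB m n fuel (dropColumns m n (blankCells g S)) (total + (S.length : Int))

def solution_alt (m : Int) (n : Int) (board : List String) : Int :=
  let g0 := (List.range m.toNat).map (fun i => (board.getD i "").toList)
  loopB m n (m.toNat * n.toNat + 1) g0 0

-- ===== PRECONDITION & SPEC =====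
-- Pre_ restricts to well-formed boards: m ≤ len(board) (else A's list-comprehension raises
-- IndexError) and, when m,n ≥ 2, the first m rows have length ≥ n (on ragged boards A raises
-- IndexError except when every short row hides behind '/'-cells; that accidental remainder of
-- A's domain is excluded together with the raising inputs).
def Pre_solution (m : Int) (n : Int) (board : List String) : Prop :=
  m ≤ (board.length : Int) ∧
    (2 ≤ m → 2 ≤ n → ∀ s ∈ board.take m.toNat, n ≤ PySem.Str.len s)
instance (m : Int) (n : Int) (board : List String) : Decidable (Pre_solution m n board) := by
  unfold Pre_solution; infer_instance
def pvWitness_solution : Int × Int × List String := (2, 3, ["AAB", "AAB"])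

def Spec_solution (m : Int) (n : Int) (board : List String) (out : Int) : Prop := out = solution_alt m n board
instance (m : Int) (n : Int) (board : List String) (out : Int) : Decidable (Spec_solution m n board out) := by unfold Spec_solution; infer_instance

-- ===== CLAIM (what is proved, stated in full; the proofs are below) =====
def Claim_equal_solution : Prop := ∀ (m : Int) (n : Int) (board : List String), Dom_solution m n board → Pre_solution m n board → Spec_solution m n board (solution m n board)

-- ===== LEMMAS AND PROOFS =====

-- ---------- shapes and cell access ----------

def gshape {α : Type} (g : List (List α)) : List Nat := g.map List.length

def GShape (M N : Nat) (g : List (List Char)) : Prop :=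
  g.length = M ∧ ∀ row ∈ g, N ≤ row.length

def VShape (M N : Nat) (v : List (List Bool)) : Prop :=
  v.length = M ∧ ∀ row ∈ v, row.length = N

lemma getD_row_mem {α : Type} (g : List (List α)) (i : Nat) (hi : i < g.length) :
    g.getD i [] ∈ g := by
  rw [List.getD_eq_getElem _ _ hi]; exact List.getElem_mem hi

lemma gshape_gset {α : Type} (g : List (List α)) (i j : Nat) (a : α) :
    gshape (gset g i j a) = gshape g := by
  unfold gshape gset
  apply List.ext_getElem (by simp)
  intro k h1 h2
  simp only [List.getElem_map]
  rw [List.getElem_modify]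
  by_cases hik : i = k
  · simp [hik, List.length_set]
  · simp [hik]

lemma length_of_gshape_eq {α : Type} {g1 g2 : List (List α)} (h : gshape g1 = gshape g2) :
    g1.length = g2.length := by
  have := congrArg List.length h
  simpa [gshape] using this

lemma rowlen_of_gshape_eq {α : Type} {g1 g2 : List (List α)} (h : gshape g1 = gshape g2)
    (k : Nat) : (g1.getD k []).length = (g2.getD k []).length := by
  have hlen := length_of_gshape_eq h
  by_cases hk : k < g1.length
  · have hk2 : k < g2.length := by omega
    rw [List.getD_eq_getElem _ _ hk, List.getD_eq_getElem _ _ hk2]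
    have h1 : (gshape g1)[k]'(by simpa [gshape]) = (gshape g2)[k]'(by simpa [gshape]) := by
      simp [h]
    simpa [gshape] using h1
  · rw [List.getD_eq_getElem?_getD, List.getD_eq_getElem?_getD]
    rw [List.getElem?_eq_none (by omega), List.getElem?_eq_none (by omega)]

lemma GShape_of_gshape_eq {M N : Nat} {g1 g2 : List (List Char)}
    (h : gshape g1 = gshape g2) (hg : GShape M N g2) : GShape M N g1 := by
  refine ⟨by rw [length_of_gshape_eq h]; exact hg.1, ?_⟩
  intro row hrow
  have : row.length ∈ gshape g1 := List.mem_map_of_mem hrow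
  rw [h] at this
  obtain ⟨row2, hrow2, hlen⟩ := List.mem_map.1 this
  rw [← hlen]; exact hg.2 row2 hrow2

lemma VShape_of_gshape_eq {M N : Nat} {v1 v2 : List (List Bool)}
    (h : gshape v1 = gshape v2) (hv : VShape M N v2) : VShape M N v1 := by
  refine ⟨by rw [length_of_gshape_eq h]; exact hv.1, ?_⟩
  intro row hrow
  have : row.length ∈ gshape v1 := List.mem_map_of_mem hrow
  rw [h] at this
  obtain ⟨row2, hrow2, hlen⟩ := List.mem_map.1 this
  rw [← hlen]; exact hv.2 row2 hrow2

lemma gget_gset_ne {α : Type} (d : α) (g : List (List α)) {i j i' j' : Nat} (a : α)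
    (h : (i', j') ≠ (i, j)) : gget d (gset g i j a) i' j' = gget d g i' j' := by
  unfold gget gset
  simp only [List.getD_eq_getElem?_getD, List.getElem?_modify]
  by_cases hi : i = i'
  · subst hi
    have hj : j ≠ j' := fun e => h (by rw [e])
    cases hrow : g[i]? with
    | none => rfl
    | some row =>
      simp [hj]
  · simp only [if_neg hi]
    cases g[i']? <;> rfl

lemma gget_gset_self {α : Type} (d : α) (g : List (List α)) {i j : Nat} (a : α)
    (hi : i < g.length) (hj : j < (g.getD i []).length) :
    gget d (gset g i j a) i j = a := by
  unfold gget gset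
  have h1 : i < (g.modify i (fun row => row.set j a)).length := by simpa using hi
  rw [List.getD_eq_getElem _ _ h1, List.getElem_modify, if_pos rfl]
  rw [List.getD_eq_getElem _ _ hi] at hj
  rw [List.getD_eq_getElem _ _ (by simpa [List.length_set] using hj)]
  exact List.getElem_set_self ..

lemma grid_eq_of_gget {α : Type} (d : α) (g1 g2 : List (List α))
    (hs : gshape g1 = gshape g2) (h : ∀ i j, gget d g1 i j = gget d g2 i j) : g1 = g2 := by
  have hlen := length_of_gshape_eq hs
  apply List.ext_getElem hlen
  intro i h1 h2
  have hrl : g1[i].length = g2[i].length := by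
    have := rowlen_of_gshape_eq hs i
    rwa [List.getD_eq_getElem _ _ h1, List.getD_eq_getElem _ _ h2] at this
  apply List.ext_getElem hrl
  intro j hj1 hj2
  have := h i j
  unfold gget at this
  rwa [List.getD_eq_getElem _ _ h1, List.getD_eq_getElem _ _ h2,
    List.getD_eq_getElem _ _ hj1, List.getD_eq_getElem _ _ hj2] at this


-- ---------- marking pass vs. match set ----------

def bstep (g : List (List Char)) (i : Nat) (S : PySem.Set (Nat × Nat)) (j : Nat) :
    PySem.Set (Nat × Nat) :=
  let c := gget '/' g i j
  if c ≠ '/' ∧ gget '/' g i (j+1) = c ∧ gget '/' g (i+1) j = c ∧ gget '/' g (i+1) (j+1) = c then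
    PySem.Set.add (PySem.Set.add (PySem.Set.add (PySem.Set.add S (i, j)) (i, j+1)) (i+1, j)) (i+1, j+1)
  else S

lemma findMatches_eq (m n : Int) (g : List (List Char)) :
    findMatches m n g =
      (List.range (m-1).toNat).foldl (fun S i =>
        (List.range (n-1).toNat).foldl (bstep g i) S) PySem.Set.empty := rfl

def VRel (v : List (List Bool)) (S : List (Nat × Nat)) : Prop :=
  ∀ p : Nat × Nat, gget false v p.1 p.2 = decide (p ∈ S)

def SInv (M N : Nat) (S : List (Nat × Nat)) : Prop :=
  S.Nodup ∧ (∀ p ∈ S, p.1 < M ∧ p.2 < N) ∧ (S ≠ [] → 2 ≤ M ∧ 2 ≤ N)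

lemma mark_add_step {M N : Nat} (v : List (List Bool)) (S : PySem.Set (Nat × Nat))
    (p : Nat × Nat) (hv : VShape M N v) (hrel : VRel v S) (hp1 : p.1 < M) (hp2 : p.2 < N) :
    VShape M N (gset v p.1 p.2 true) ∧ VRel (gset v p.1 p.2 true) (PySem.Set.add S p) := by
  refine ⟨VShape_of_gshape_eq (gshape_gset ..) hv, ?_⟩
  intro q
  by_cases hq : q = p
  · subst hq
    have hi : q.1 < v.length := by rw [hv.1]; exact hp1
    have hj : q.2 < (v.getD q.1 []).length := by
      rw [hv.2 _ (getD_row_mem v q.1 hi)]; exact hp2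
    rw [gget_gset_self _ _ _ hi hj]
    simp [PySem.Set.mem_add]
  · have : ((q.1 : Nat), (q.2 : Nat)) ≠ (p.1, p.2) := by
      intro e; exact hq (Prod.ext (congrArg Prod.fst e) (congrArg Prod.snd e))
    rw [gget_gset_ne _ _ _ this, hrel q]
    simp [PySem.Set.mem_add, hq]

lemma AB_step (g : List (List Char)) {M N : Nat} (i j : Nat) (hi : i + 1 < M) (hj : j + 1 < N)
    (v : List (List Bool)) (S : PySem.Set (Nat × Nat))
    (hv : VShape M N v) (hrel : VRel v S) (hS : SInv M N S) :
    VShape M N (if gget '/' g i j ≠ '/' then deleteBlock g v i j else v) ∧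
    VRel (if gget '/' g i j ≠ '/' then deleteBlock g v i j else v) (bstep g i S j) ∧
    SInv M N (bstep g i S j) := by
  unfold bstep
  by_cases hc : gget '/' g i j ≠ '/' ∧ gget '/' g i (j+1) = gget '/' g i j ∧
      gget '/' g (i+1) j = gget '/' g i j ∧ gget '/' g (i+1) (j+1) = gget '/' g i j
  · rw [if_pos hc.1]
    have hA : deleteBlock g v i j =
        gset (gset (gset (gset v i j true) i (j+1) true) (i+1) j true) (i+1) (j+1) true := by
      unfold deleteBlock
      rw [if_neg (by simp [hc.2.1]), if_neg (by simp [hc.2.2.1]), if_neg (by simp [hc.2.2.2])]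
    rw [hA, if_pos hc]
    obtain ⟨hv1, hrel1⟩ := mark_add_step v S (i, j) hv hrel (by omega) (by omega)
    obtain ⟨hv2, hrel2⟩ := mark_add_step _ _ (i, j+1) hv1 hrel1 (by omega) (by omega)
    obtain ⟨hv3, hrel3⟩ := mark_add_step _ _ (i+1, j) hv2 hrel2 (by omega) (by omega)
    obtain ⟨hv4, hrel4⟩ := mark_add_step _ _ (i+1, j+1) hv3 hrel3 (by omega) (by omega)
    refine ⟨hv4, hrel4, ?_, ?_, fun _ => ⟨by omega, by omega⟩⟩
    · exact PySem.Set.nodup_add _ _ (PySem.Set.nodup_add _ _ (PySem.Set.nodup_add _ _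
        (PySem.Set.nodup_add _ _ hS.1)))
    · intro p hp
      rw [PySem.Set.mem_add] at hp
      rcases hp with hp | hp
      · rw [PySem.Set.mem_add] at hp
        rcases hp with hp | hp
        · rw [PySem.Set.mem_add] at hp
          rcases hp with hp | hp
          · rw [PySem.Set.mem_add] at hp
            rcases hp with hp | hp
            · exact hS.2.1 p hp
            · subst hp; exact ⟨by omega, by omega⟩
          · subst hp; exact ⟨by omega, by omega⟩
        · subst hp; exact ⟨by omega, by omega⟩
      · subst hp; exact ⟨by omega, by omega⟩
  · rw [if_neg hc]
    have hA : (if gget '/' g i j ≠ '/' then deleteBlock g v i j else v) = v := by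
      by_cases h0 : gget '/' g i j = '/'
      · rw [if_neg (by simpa using h0)]
      · rw [if_pos h0]
        unfold deleteBlock
        by_cases h1 : gget '/' g i (j+1) = gget '/' g i j
        · rw [if_neg (by simpa using h1)]
          by_cases h2 : gget '/' g (i+1) j = gget '/' g i j
          · rw [if_neg (by simpa using h2)]
            by_cases h3 : gget '/' g (i+1) (j+1) = gget '/' g i j
            · exact absurd ⟨h0, h1, h2, h3⟩ hc
            · rw [if_pos (by simpa using h3)]
          · rw [if_pos (by simpa using h2)]
        · rw [if_pos (by simpa using h1)]
    rw [hA]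
    exact ⟨hv, hrel, hS⟩

lemma mark_inner (g : List (List Char)) {M N : Nat} (i : Nat) (hi : i + 1 < M) :
    ∀ (js : List Nat), (∀ j ∈ js, j + 1 < N) →
    ∀ (v : List (List Bool)) (S : PySem.Set (Nat × Nat)),
      VShape M N v → VRel v S → SInv M N S →
      VShape M N (js.foldl (fun v j => if gget '/' g i j ≠ '/' then deleteBlock g v i j else v) v) ∧
      VRel (js.foldl (fun v j => if gget '/' g i j ≠ '/' then deleteBlock g v i j else v) v)
        (js.foldl (bstep g i) S) ∧
      SInv M N (js.foldl (bstep g i) S) := by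
  intro js
  induction js with
  | nil => intro _ v S hv hrel hS; exact ⟨hv, hrel, hS⟩
  | cons j js ih =>
    intro hb v S hv hrel hS
    obtain ⟨hv1, hrel1, hS1⟩ :=
      AB_step g i j hi (hb j List.mem_cons_self) v S hv hrel hS
    simpa using ih (fun j hj => hb j (List.mem_cons_of_mem _ hj)) _ _ hv1 hrel1 hS1

lemma mark_outer (g : List (List Char)) {M N : Nat} :
    ∀ (is : List Nat), (∀ i ∈ is, i + 1 < M) → ∀ (js : List Nat), (∀ j ∈ js, j + 1 < N) →
    ∀ (v : List (List Bool)) (S : PySem.Set (Nat × Nat)),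
      VShape M N v → VRel v S → SInv M N S →
      VShape M N (is.foldl (fun v i => js.foldl
          (fun v j => if gget '/' g i j ≠ '/' then deleteBlock g v i j else v) v) v) ∧
      VRel (is.foldl (fun v i => js.foldl
          (fun v j => if gget '/' g i j ≠ '/' then deleteBlock g v i j else v) v) v)
        (is.foldl (fun S i => js.foldl (bstep g i) S) S) ∧
      SInv M N (is.foldl (fun S i => js.foldl (bstep g i) S) S) := by
  intro is
  induction is with
  | nil => intro _ js _ v S hv hrel hS; exact ⟨hv, hrel, hS⟩
  | cons i is ih =>
    intro ha js hb v S hv hrel hS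
    obtain ⟨hv1, hrel1, hS1⟩ :=
      mark_inner g i (ha i List.mem_cons_self) js hb v S hv hrel hS
    simpa using ih (fun i hi => ha i (List.mem_cons_of_mem _ hi)) js hb _ _ hv1 hrel1 hS1

lemma markPass_spec (m n : Int) (g : List (List Char)) (v : List (List Bool))
    (hv : VShape m.toNat n.toNat v) (hzero : ∀ p : Nat × Nat, gget false v p.1 p.2 = false) :
    VShape m.toNat n.toNat (markPass m n g v) ∧
    VRel (markPass m n g v) (findMatches m n g) ∧
    SInv m.toNat n.toNat (findMatches m n g) := by
  have hrel : VRel v PySem.Set.empty := by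
    intro p; rw [hzero p]; simp [PySem.Set.empty]
  have hS : SInv m.toNat n.toNat PySem.Set.empty := by
    refine ⟨List.nodup_nil, by simp [PySem.Set.empty], by simp [PySem.Set.empty]⟩
  rw [findMatches_eq]
  exact mark_outer g (List.range (m-1).toNat)
    (fun i hi => by rw [List.mem_range] at hi; omega)
    (List.range (n-1).toNat)
    (fun j hj => by rw [List.mem_range] at hj; omega)
    v PySem.Set.empty hv hrel hS

lemma checkDelete_eq (m : Int) {N : Nat} (v : List (List Bool)) (S : List (Nat × Nat))
    (hv : VShape m.toNat N v) (hrel : VRel v S)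
    (hbd : ∀ p ∈ S, p.1 < m.toNat ∧ p.2 < N) :
    checkDelete m v = S.isEmpty := by
  cases S with
  | nil =>
    simp only [List.isEmpty_nil]
    rw [checkDelete, List.all_eq_true]
    intro i hi
    rw [List.mem_range] at hi
    cases hcc : (v.getD i []).contains true
    · simp
    · exfalso
      rw [List.contains_iff_mem] at hcc
      obtain ⟨j, hjlen, hj⟩ := List.mem_iff_getElem.1 hcc
      have hg : gget false v i j = true := by
        unfold gget
        rw [List.getD_eq_getElem _ _ hjlen]; exact hj
      rw [hrel ⟨i, j⟩] at hg
      simp at hg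
  | cons p S' =>
    simp only [List.isEmpty_cons]
    rw [checkDelete, List.all_eq_false]
    refine ⟨p.1, by rw [List.mem_range]; exact (hbd p List.mem_cons_self).1, ?_⟩
    have h1 : p.1 < v.length := by rw [hv.1]; exact (hbd p List.mem_cons_self).1
    have h2 : p.2 < (v.getD p.1 []).length := by
      rw [hv.2 _ (getD_row_mem v p.1 h1)]; exact (hbd p List.mem_cons_self).2
    have hmem : gget false v p.1 p.2 = true := by rw [hrel p]; simp
    have hval : (v.getD p.1 [])[p.2] = true := by
      unfold gget at hmem
      rwa [List.getD_eq_getElem _ _ h2] at hmem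
    have hcc : (v.getD p.1 []).contains true = true :=
      List.contains_iff_mem.2 (by rw [← hval]; exact List.getElem_mem h2)
    rw [hcc]
    simp


-- ---------- deletion pass: count, blank, reset ----------

def boxPairs (M N : Nat) : List (Nat × Nat) :=
  (List.range M).flatMap (fun i => (List.range N).map (fun j => (i, j)))

lemma foldl_nested_box {β : Type} (M N : Nat) (f : β → Nat × Nat → β) (init : β) :
    (List.range M).foldl (fun st i => (List.range N).foldl (fun st j => f st (i, j)) st) init =
      (boxPairs M N).foldl f init := by
  unfold boxPairs
  generalize (List.range M) = L
  induction L generalizing init with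
  | nil => rfl
  | cons i L ih =>
    rw [List.flatMap_cons, List.foldl_append, List.foldl_cons, List.foldl_map]
    exact ih _

lemma mem_boxPairs {M N : Nat} {p : Nat × Nat} :
    p ∈ boxPairs M N ↔ p.1 < M ∧ p.2 < N := by
  unfold boxPairs
  simp only [List.mem_flatMap, List.mem_map, List.mem_range]
  constructor
  · rintro ⟨i, hi, j, hj, rfl⟩; exact ⟨hi, hj⟩
  · rintro ⟨h1, h2⟩; exact ⟨p.1, h1, p.2, h2, rfl⟩

lemma nodup_boxPairs (M N : Nat) : (boxPairs M N).Nodup := by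
  unfold boxPairs
  have h := List.nodup_range (n := M)
  generalize (List.range M) = L at h ⊢
  induction L with
  | nil => simp
  | cons i L ih =>
    rw [List.flatMap_cons]
    rw [List.nodup_cons] at h
    apply List.Nodup.append
    · exact (List.nodup_range).map (fun a b e => by simpa using congrArg Prod.snd e)
    · exact ih h.2
    · intro p hp hp2
      obtain ⟨j, _, rfl⟩ := List.mem_map.1 hp
      obtain ⟨i', hi', j', _, he⟩ := by
        simpa only [List.mem_flatMap, List.mem_map] using hp2
      have hii : i' = i := by simpa using congrArg Prod.fst he
      exact h.1 (hii ▸ hi')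

def dstep (st : Int × List (List Char) × List (List Bool)) (p : Nat × Nat) :
    Int × List (List Char) × List (List Bool) :=
  if gget false st.2.2 p.1 p.2 then (st.1 + 1, gset st.2.1 p.1 p.2 '/', gset st.2.2 p.1 p.2 false)
  else st

lemma runDelete1_eq (m n : Int) (st : Int × List (List Char) × List (List Bool)) :
    runDelete1 m n st = (boxPairs m.toNat n.toNat).foldl dstep st :=
  foldl_nested_box m.toNat n.toNat dstep st

lemma pass1_spec :
    ∀ (L : List (Nat × Nat)), L.Nodup →
    ∀ (ans : Int) (g : List (List Char)) (v : List (List Bool)),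
      (∀ p ∈ L, p.1 < g.length ∧ p.2 < (g.getD p.1 []).length ∧
                p.1 < v.length ∧ p.2 < (v.getD p.1 []).length) →
      (L.foldl dstep (ans, g, v)).1 =
          ans + (List.countP (fun p => gget false v p.1 p.2) L : Int) ∧
      gshape (L.foldl dstep (ans, g, v)).2.1 = gshape g ∧
      gshape (L.foldl dstep (ans, g, v)).2.2 = gshape v ∧
      (∀ q : Nat × Nat, gget '/' (L.foldl dstep (ans, g, v)).2.1 q.1 q.2 =
          if q ∈ L ∧ gget false v q.1 q.2 = true then '/' else gget '/' g q.1 q.2) ∧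
      (∀ q : Nat × Nat, gget false (L.foldl dstep (ans, g, v)).2.2 q.1 q.2 =
          (gget false v q.1 q.2 && !(decide (q ∈ L)))) := by
  intro L
  induction L with
  | nil =>
    intro _ ans g v _
    refine ⟨by simp, rfl, rfl, fun q => by simp, fun q => by simp⟩
  | cons p L ih =>
    intro hnd ans g v hr
    rw [List.nodup_cons] at hnd
    obtain ⟨hg1, hg2, hv1, hv2⟩ := hr p List.mem_cons_self
    have hrest := fun q hq => hr q (List.mem_cons_of_mem _ hq)
    by_cases hb : gget false v p.1 p.2 = true
    · have hstep : dstep (ans, g, v) p =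
          (ans + 1, gset g p.1 p.2 '/', gset v p.1 p.2 false) := by
        unfold dstep; rw [if_pos hb]
      rw [List.foldl_cons, hstep]
      set g1 := gset g p.1 p.2 '/' with hg1d
      set v1 := gset v p.1 p.2 false with hv1d
      have hrest1 : ∀ q ∈ L, q.1 < g1.length ∧ q.2 < (g1.getD q.1 []).length ∧
          q.1 < v1.length ∧ q.2 < (v1.getD q.1 []).length := by
        intro q hq
        obtain ⟨a1, a2, a3, a4⟩ := hrest q hq
        refine ⟨?_, ?_, ?_, ?_⟩
        · rwa [length_of_gshape_eq (gshape_gset ..)]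
        · rwa [rowlen_of_gshape_eq (gshape_gset ..)]
        · rwa [length_of_gshape_eq (gshape_gset ..)]
        · rwa [rowlen_of_gshape_eq (gshape_gset ..)]
      obtain ⟨ih1, ih2, ih3, ih4, ih5⟩ := ih hnd.2 (ans + 1) g1 v1 hrest1
      have hvv : ∀ q ∈ L, gget false v1 q.1 q.2 = gget false v q.1 q.2 := by
        intro q hq
        apply gget_gset_ne
        intro e
        exact hnd.1 (by
          have : q = p := Prod.ext (congrArg Prod.fst e) (congrArg Prod.snd e)
          rwa [← this])
      refine ⟨?_, by rw [ih2]; exact gshape_gset .., by rw [ih3]; exact gshape_gset .., ?_, ?_⟩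
      · rw [ih1]
        have : List.countP (fun q => gget false v1 q.1 q.2) L =
            List.countP (fun q => gget false v q.1 q.2) L :=
          List.countP_congr (fun q hq => by rw [hvv q hq])
        rw [this, List.countP_cons]
        simp only [hb, if_true]
        omega
      · intro q
        rw [ih4 q]
        by_cases hq : q = p
        · subst hq
          have hnotin : q ∉ L := hnd.1
          rw [if_neg (by simp [hnotin]), if_pos ⟨List.mem_cons_self, hb⟩]
          exact gget_gset_self _ _ _ hg1 hg2
        · have hne : ((q.1 : Nat), (q.2 : Nat)) ≠ (p.1, p.2) := by
            intro e; exact hq (Prod.ext (congrArg Prod.fst e) (congrArg Prod.snd e))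
          rw [show (gget false v1 q.1 q.2) = gget false v q.1 q.2 from gget_gset_ne _ _ _ hne,
              show (gget '/' g1 q.1 q.2) = gget '/' g q.1 q.2 from gget_gset_ne _ _ _ hne]
          by_cases hqL : q ∈ L
          · simp [hqL, List.mem_cons_of_mem _ hqL]
          · have hq2 : q ∉ (p :: L) := by simp [hq, hqL]
            simp [hqL, hq2]
      · intro q
        rw [ih5 q]
        by_cases hq : q = p
        · subst hq
          rw [gget_gset_self _ _ _ hv1 hv2]
          simp
        · have hne : ((q.1 : Nat), (q.2 : Nat)) ≠ (p.1, p.2) := by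
            intro e; exact hq (Prod.ext (congrArg Prod.fst e) (congrArg Prod.snd e))
          rw [gget_gset_ne _ _ _ hne]
          by_cases hqL : q ∈ L
          · simp [hqL, List.mem_cons_of_mem _ hqL]
          · have : q ∉ (p :: L) := by simp [hq, hqL]
            simp [hqL, this]
    · have hstep : dstep (ans, g, v) p = (ans, g, v) := by
        unfold dstep; rw [if_neg hb]
      rw [List.foldl_cons, hstep]
      obtain ⟨ih1, ih2, ih3, ih4, ih5⟩ := ih hnd.2 ans g v hrest
      rw [Bool.not_eq_true] at hb
      refine ⟨?_, ih2, ih3, ?_, ?_⟩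
      · rw [ih1, List.countP_cons]
        simp [hb]
      · intro q
        rw [ih4 q]
        by_cases hq : q = p
        · subst hq
          rw [if_neg (by simp [hb]), if_neg (by simp [hb])]
        · have : (q ∈ (p :: L)) ↔ q ∈ L := by simp [hq]
          simp only [this]
      · intro q
        rw [ih5 q]
        by_cases hq : q = p
        · subst hq
          rw [hb]
          simp
        · have : (q ∈ (p :: L)) ↔ q ∈ L := by simp [hq]
          simp only [this]

lemma countP_mem_eq_length (L S : List (Nat × Nat)) (hL : L.Nodup) (hS : S.Nodup)
    (hsub : ∀ p ∈ S, p ∈ L) :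
    List.countP (fun p => decide (p ∈ S)) L = S.length := by
  rw [List.countP_eq_length_filter]
  refine List.Perm.length_eq ?_
  refine (List.perm_ext_iff_of_nodup (hL.filter _) hS).2 ?_
  intro a
  simp only [List.mem_filter, decide_eq_true_eq]
  exact ⟨fun h => h.2, fun h => ⟨hsub a h, h⟩⟩

lemma blank_spec :
    ∀ (ps : List (Nat × Nat)) (g : List (List Char)),
      (∀ p ∈ ps, p.1 < g.length ∧ p.2 < (g.getD p.1 []).length) →
      gshape (blankCells g ps) = gshape g ∧
      (∀ q : Nat × Nat, gget '/' (blankCells g ps) q.1 q.2 =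
        if q ∈ ps then '/' else gget '/' g q.1 q.2) := by
  intro ps
  induction ps with
  | nil => intro g _; exact ⟨rfl, fun q => by simp [blankCells]⟩
  | cons p ps ih =>
    intro g hr
    obtain ⟨h1, h2⟩ := hr p List.mem_cons_self
    have hrest : ∀ q ∈ ps, q.1 < (gset g p.1 p.2 '/').length ∧
        q.2 < ((gset g p.1 p.2 '/').getD q.1 []).length := by
      intro q hq
      obtain ⟨a1, a2⟩ := hr q (List.mem_cons_of_mem _ hq)
      constructor
      · rwa [length_of_gshape_eq (gshape_gset ..)]
      · rwa [rowlen_of_gshape_eq (gshape_gset ..)]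
    have hstep : blankCells g (p :: ps) = blankCells (gset g p.1 p.2 '/') ps := rfl
    obtain ⟨ih1, ih2⟩ := ih (gset g p.1 p.2 '/') hrest
    rw [hstep]
    refine ⟨by rw [ih1]; exact gshape_gset .., ?_⟩
    intro q
    rw [ih2 q]
    by_cases hq : q ∈ ps
    · simp [hq, List.mem_cons_of_mem _ hq]
    · by_cases hqp : q = p
      · subst hqp
        rw [if_neg hq, if_pos List.mem_cons_self]
        exact gget_gset_self _ _ _ h1 h2
      · have hne : ((q.1 : Nat), (q.2 : Nat)) ≠ (p.1, p.2) := by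
          intro e; exact hqp (Prod.ext (congrArg Prod.fst e) (congrArg Prod.snd e))
        rw [if_neg hq, gget_gset_ne _ _ _ hne, if_neg (by simp [hq, hqp])]


-- ---------- gravity: columns ----------

def colA (M : Nat) (g : List (List Char)) (j : Nat) : List Char :=
  (List.range M).map (fun i => gget '/' g i j)

lemma length_colA (M : Nat) (g : List (List Char)) (j : Nat) : (colA M g j).length = M := by
  simp [colA]

lemma colA_getD (M : Nat) (g : List (List Char)) (j : Nat) (hg : g.length = M) (i : Nat) :
    (colA M g j).getD i '/' = gget '/' g i j := by
  by_cases hi : i < M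
  · rw [List.getD_eq_getElem _ _ (by simp [colA, hi])]
    simp [colA]
  · have h1 : (colA M g j).getD i '/' = '/' := by
      rw [List.getD_eq_getElem?_getD, List.getElem?_eq_none (by rw [length_colA]; omega)]
      rfl
    have h2 : g.getD i [] = [] := by
      rw [List.getD_eq_getElem?_getD, List.getElem?_eq_none (by omega)]
      rfl
    rw [h1]
    unfold gget
    rw [h2]
    rfl

lemma colA_congr (M : Nat) (g1 g2 : List (List Char)) (j : Nat)
    (h : ∀ i, gget '/' g1 i j = gget '/' g2 i j) : colA M g1 j = colA M g2 j :=
  List.map_congr_left (fun i _ => h i)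

lemma colA_gset {M N : Nat} (g : List (List Char)) (hg : GShape M N g) {j : Nat} (hj : j < N)
    (i : Nat) (c : Char) : colA M (gset g i j c) j = (colA M g j).set i c := by
  apply List.ext_getElem (by simp [colA, List.length_set])
  intro k hk1 hk2
  have hkM : k < M := by simpa [colA] using hk1
  have hcol : (colA M (gset g i j c) j)[k] = gget '/' (gset g i j c) k j := by simp [colA]
  rw [hcol, List.getElem_set]
  by_cases hik : i = k
  · subst hik
    rw [if_pos rfl]
    have hi : i < g.length := by rw [hg.1]; exact hkM
    have hjr : j < (g.getD i []).length := by
      have := hg.2 _ (getD_row_mem g i hi)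
      omega
    exact gget_gset_self _ _ _ hi hjr
  · rw [if_neg hik]
    rw [gget_gset_ne _ _ _ (by simp [Ne.symm hik])]
    simp [colA]

lemma colA_gset_ne (M : Nat) (g : List (List Char)) {j j' : Nat} (h : j' ≠ j) (i : Nat)
    (c : Char) : colA M (gset g i j' c) j = colA M g j :=
  colA_congr M _ g j (fun k => gget_gset_ne _ _ _ (by simp; intro _; exact fun e => h e.symm))

def cbubble (m : Int) (c : List Char) (prev next : Nat) : List Char :=
  if h : (next : Int) < m ∧ c.getD next '/' = '/' then
    cbubble m ((c.set prev (c.getD next '/')).set next (c.getD prev '/')) next (next + 1)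
  else c
termination_by m.toNat - next
decreasing_by have := h.1; omega

lemma bubble_props (m : Int) {N : Nat} {j : Nat} (hj : j < N) :
    ∀ (k next prev : Nat), m.toNat - next ≤ k → ∀ g, GShape m.toNat N g →
      gshape (bubble m j g prev next) = gshape g ∧
      (∀ j', j' ≠ j → ∀ i', gget '/' (bubble m j g prev next) i' j' = gget '/' g i' j') ∧
      colA m.toNat (bubble m j g prev next) j = cbubble m (colA m.toNat g j) prev next := by
  intro k
  induction k with
  | zero =>
    intro next prev hk g hg
    have hcond : ¬ ((next : Int) < m) := by omega
    rw [bubble, cbubble, dif_neg (fun h => hcond h.1), dif_neg (fun h => hcond h.1)]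
    exact ⟨rfl, fun _ _ _ => rfl, rfl⟩
  | succ k ih =>
    intro next prev hk g hg
    have hcolD := colA_getD m.toNat g j hg.1
    rw [bubble, cbubble]
    by_cases hcond : (next : Int) < m ∧ gget '/' g next j = '/'
    · have hcond' : (next : Int) < m ∧ (colA m.toNat g j).getD next '/' = '/' :=
        ⟨hcond.1, by rw [hcolD]; exact hcond.2⟩
      rw [dif_pos hcond, dif_pos hcond']
      set g2 := gset (gset g prev j (gget '/' g next j)) next j (gget '/' g prev j) with hg2
      have hsh : gshape g2 = gshape g := by rw [hg2, gshape_gset, gshape_gset]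
      have hg2' : GShape m.toNat N g2 := GShape_of_gshape_eq hsh hg
      have hcA : colA m.toNat g2 j =
          ((colA m.toNat g j).set prev (gget '/' g next j)).set next (gget '/' g prev j) := by
        rw [hg2, colA_gset _ (GShape_of_gshape_eq (gshape_gset ..) hg) hj,
            colA_gset _ hg hj]
      obtain ⟨s1, s2, s3⟩ := ih (next+1) next (by omega) g2 hg2'
      refine ⟨by rw [s1, hsh], ?_, ?_⟩
      · intro j' hj' i'
        rw [s2 j' hj' i', hg2, gget_gset_ne _ _ _ (by simp [hj']),
            gget_gset_ne _ _ _ (by simp [hj'])]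
      · rw [s3, hcA, hcolD, hcolD]
    · have hcond' : ¬ ((next : Int) < m ∧ (colA m.toNat g j).getD next '/' = '/') := by
        intro hc; exact hcond ⟨hc.1, by rw [← hcolD next]; exact hc.2⟩
      rw [dif_neg hcond, dif_neg hcond']
      exact ⟨rfl, fun _ _ _ => rfl, rfl⟩

def stepC (m : Int) (i : Nat) (c : List Char) : List Char :=
  if c.getD i '/' ≠ '/' ∧ c.getD (i+1) '/' = '/' then cbubble m c i (i+1) else c

lemma grav_inner (m : Int) {N : Nat} (i : Nat) :
    ∀ (js : List Nat), js.Nodup → (∀ j ∈ js, j < N) → ∀ g, GShape m.toNat N g →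
      gshape (js.foldl (fun g j =>
          if gget '/' g i j ≠ '/' ∧ gget '/' g (i+1) j = '/' then bubble m j g i (i+1) else g) g)
        = gshape g ∧
      ∀ j, colA m.toNat (js.foldl (fun g j =>
          if gget '/' g i j ≠ '/' ∧ gget '/' g (i+1) j = '/' then bubble m j g i (i+1) else g) g) j
        = if j ∈ js then stepC m i (colA m.toNat g j) else colA m.toNat g j := by
  intro js
  induction js with
  | nil => intro _ _ g hg; exact ⟨rfl, fun j => by simp⟩
  | cons j0 js ih =>
    intro hnd hb g hg
    rw [List.nodup_cons] at hnd
    have hj0 : j0 < N := hb j0 List.mem_cons_self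
    have hcolD := colA_getD m.toNat g j0 hg.1
    set g1 := (if gget '/' g i j0 ≠ '/' ∧ gget '/' g (i+1) j0 = '/' then bubble m j0 g i (i+1)
        else g) with hg1
    have hgg1 : gshape g1 = gshape g := by
      rw [hg1]
      split
      · exact (bubble_props m hj0 m.toNat (i+1) i (by omega) g hg).1
      · rfl
    have hcol_j0 : colA m.toNat g1 j0 = stepC m i (colA m.toNat g j0) := by
      rw [hg1]
      unfold stepC
      rw [hcolD i, hcolD (i+1)]
      split
      · exact (bubble_props m hj0 m.toNat (i+1) i (by omega) g hg).2.2
      · rfl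
    have hcol_ne : ∀ j, j ≠ j0 → colA m.toNat g1 j = colA m.toNat g j := by
      intro j hjne
      rw [hg1]
      split
      · exact colA_congr m.toNat _ g j
          ((bubble_props m hj0 m.toNat (i+1) i (by omega) g hg).2.1 j hjne)
      · rfl
    obtain ⟨ihs, ihc⟩ := ih hnd.2 (fun j hj => hb j (List.mem_cons_of_mem _ hj)) g1
      (GShape_of_gshape_eq hgg1 hg)
    refine ⟨by rw [List.foldl_cons, ← hg1, ihs, hgg1], ?_⟩
    intro j
    rw [List.foldl_cons, ← hg1, ihc j]
    by_cases hjj : j ∈ js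
    · have hne : j ≠ j0 := fun e => hnd.1 (e ▸ hjj)
      rw [if_pos hjj, if_pos (List.mem_cons_of_mem _ hjj), hcol_ne j hne]
    · rw [if_neg hjj]
      by_cases hj0j : j = j0
      · subst hj0j
        rw [if_pos List.mem_cons_self, hcol_j0]
      · rw [if_neg (by simp [hj0j, hjj]), hcol_ne j hj0j]

lemma grav_outer (m n : Int) :
    ∀ (is : List Nat), ∀ g, GShape m.toNat n.toNat g →
      gshape (is.foldl (fun g i => (List.range n.toNat).foldl (fun g j =>
          if gget '/' g i j ≠ '/' ∧ gget '/' g (i+1) j = '/' then bubble m j g i (i+1) else g) g) g)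
        = gshape g ∧
      ∀ j, colA m.toNat (is.foldl (fun g i => (List.range n.toNat).foldl (fun g j =>
          if gget '/' g i j ≠ '/' ∧ gget '/' g (i+1) j = '/' then bubble m j g i (i+1) else g) g) g) j
        = if j < n.toNat then is.foldl (fun c i => stepC m i c) (colA m.toNat g j)
          else colA m.toNat g j := by
  intro is
  induction is with
  | nil => intro g hg; exact ⟨rfl, fun j => by simp⟩
  | cons i is ih =>
    intro g hg
    obtain ⟨hs1, hc1⟩ := grav_inner m i (List.range n.toNat) List.nodup_range
      (fun j hj => List.mem_range.1 hj) g hg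
    set g1 := (List.range n.toNat).foldl (fun g j =>
        if gget '/' g i j ≠ '/' ∧ gget '/' g (i+1) j = '/' then bubble m j g i (i+1) else g) g
      with hg1
    obtain ⟨ihs, ihc⟩ := ih g1 (GShape_of_gshape_eq hs1 hg)
    refine ⟨by rw [List.foldl_cons, ← hg1, ihs, hs1], ?_⟩
    intro j
    rw [List.foldl_cons, ← hg1, ihc j]
    by_cases hj : j < n.toNat
    · rw [if_pos hj, if_pos hj, List.foldl_cons, hc1 j, if_pos (List.mem_range.2 hj)]
    · rw [if_neg hj, if_neg hj, hc1 j, if_neg (by simpa using hj)]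


-- ---------- gravity: compaction ----------

def compactL (M : Nat) (c : List Char) : List Char :=
  List.replicate (M - (c.filter (fun x => x ≠ '/')).length) '/' ++ c.filter (fun x => x ≠ '/')

def csuf (s : List Char) : List Char :=
  List.replicate (s.length - (s.filter (fun x => x ≠ '/')).length) '/' ++ s.filter (fun x => x ≠ '/')

lemma compactL_eq_csuf (M : Nat) (c : List Char) (hc : c.length = M) :
    compactL M c = csuf c := by
  unfold compactL csuf
  rw [hc]

lemma foldl_set_getD (val : Nat → Char) :
    ∀ (is : List Nat) (c : List Char), (∀ i ∈ is, i < c.length) →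
      (is.foldl (fun c i => c.set i (val i)) c).length = c.length ∧
      ∀ k, (is.foldl (fun c i => c.set i (val i)) c).getD k '/' =
        if k ∈ is then val k else c.getD k '/' := by
  intro is
  induction is with
  | nil => intro c _; exact ⟨rfl, fun k => by simp⟩
  | cons i is ih =>
    intro c hb
    have hi : i < c.length := hb i List.mem_cons_self
    obtain ⟨ih1, ih2⟩ := ih (c.set i (val i))
      (fun i' hi' => by rw [List.length_set]; exact hb i' (List.mem_cons_of_mem _ hi'))
    rw [List.foldl_cons]
    refine ⟨by rw [ih1, List.length_set], ?_⟩
    intro k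
    rw [ih2 k]
    by_cases hk : k ∈ is
    · rw [if_pos hk, if_pos (List.mem_cons_of_mem _ hk)]
    · rw [if_neg hk]
      by_cases hki : k = i
      · subst hki
        rw [if_pos List.mem_cons_self,
          List.getD_eq_getElem _ _ (by rw [List.length_set]; exact hi),
          List.getElem_set, if_pos rfl]
      · rw [if_neg (by simp [hki, hk]), List.getD_eq_getElem?_getD, List.getElem?_set,
          if_neg (fun e => hki e.symm), ← List.getD_eq_getElem?_getD]

lemma foldl_set_eq_map (val : Nat → Char) (c : List Char) (M : Nat) (hc : c.length = M) :
    (List.range M).foldl (fun c i => c.set i (val i)) c = (List.range M).map val := by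
  obtain ⟨h1, h2⟩ := foldl_set_getD val (List.range M) c
    (fun i hi => by rw [hc]; exact List.mem_range.1 hi)
  apply List.ext_getElem (by rw [h1, hc]; simp)
  intro k hk1 hk2
  have hkM : k < M := by rw [h1, hc] at hk1; exact hk1
  have hval := h2 k
  rw [if_pos (List.mem_range.2 hkM)] at hval
  rw [← List.getD_eq_getElem _ '/' hk1, hval, List.getElem_map, List.getElem_range]

lemma gsetcol_fold {M N : Nat} {j : Nat} (hj : j < N) (val : Nat → Char) :
    ∀ (is : List Nat) (g : List (List Char)), GShape M N g →
      gshape (is.foldl (fun g i => gset g i j (val i)) g) = gshape g ∧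
      colA M (is.foldl (fun g i => gset g i j (val i)) g) j =
        is.foldl (fun c i => c.set i (val i)) (colA M g j) ∧
      ∀ j', j' ≠ j → colA M (is.foldl (fun g i => gset g i j (val i)) g) j' = colA M g j' := by
  intro is
  induction is with
  | nil => intro g hg; exact ⟨rfl, rfl, fun _ _ => rfl⟩
  | cons i is ih =>
    intro g hg
    obtain ⟨ih1, ih2, ih3⟩ := ih (gset g i j (val i)) (GShape_of_gshape_eq (gshape_gset ..) hg)
    rw [List.foldl_cons, List.foldl_cons]
    refine ⟨by rw [ih1, gshape_gset], ?_, ?_⟩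
    · rw [ih2, colA_gset _ hg hj]
    · intro j' hj'
      rw [ih3 j' hj', colA_gset_ne _ _ (Ne.symm hj')]

lemma map_val_eq_compactL (M : Nat) (c : List Char) (hc : c.length = M) :
    (List.range M).map (fun i =>
        if i < M - (c.filter (fun x => x ≠ '/')).length then '/'
        else (c.filter (fun x => x ≠ '/')).getD
          (i - (M - (c.filter (fun x => x ≠ '/')).length)) '/')
      = compactL M c := by
  have hk : (c.filter (fun x => x ≠ '/')).length ≤ M := by
    rw [← hc]; exact List.length_filter_le _ c
  have hlen2 : (compactL M c).length = M := by
    unfold compactL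
    rw [List.length_append, List.length_replicate]
    omega
  apply List.ext_getElem (by rw [hlen2]; simp)
  intro i h1 h2
  have hiM : i < M := by simpa using h1
  rw [List.getElem_map, List.getElem_range]
  unfold compactL
  by_cases hip : i < M - (c.filter (fun x => x ≠ '/')).length
  · rw [if_pos hip,
      List.getElem_append_left (by rw [List.length_replicate]; omega), List.getElem_replicate]
  · rw [if_neg hip,
      List.getElem_append_right (by rw [List.length_replicate]; omega)]
    simp only [List.length_replicate]
    rw [List.getD_eq_getElem _ _ (by omega)]

def dcbody (m : Int) (g : List (List Char)) (j : Nat) : List (List Char) :=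
  let col := ((List.range m.toNat).map (fun i => gget '/' g i j)).filter (fun c => c ≠ '/')
  let pad := m.toNat - col.length
  (List.range m.toNat).foldl (fun g i =>
    gset g i j (if i < pad then '/' else col.getD (i - pad) '/')) g

lemma dropColumns_eq (m n : Int) (g : List (List Char)) :
    dropColumns m n g = (List.range n.toNat).foldl (dcbody m) g := rfl

lemma dcbody_spec (m : Int) {N : Nat} {j : Nat} (hj : j < N) (g : List (List Char))
    (hg : GShape m.toNat N g) :
    gshape (dcbody m g j) = gshape g ∧
    colA m.toNat (dcbody m g j) j = compactL m.toNat (colA m.toNat g j) ∧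
    ∀ j', j' ≠ j → colA m.toNat (dcbody m g j) j' = colA m.toNat g j' := by
  obtain ⟨f1, f2, f3⟩ := gsetcol_fold (M := m.toNat) hj
    (fun i => if i < m.toNat - ((colA m.toNat g j).filter (fun x => x ≠ '/')).length then '/'
      else ((colA m.toNat g j).filter (fun x => x ≠ '/')).getD
        (i - (m.toNat - ((colA m.toNat g j).filter (fun x => x ≠ '/')).length)) '/')
    (List.range m.toNat) g hg
  refine ⟨f1, ?_, f3⟩
  show colA m.toNat ((List.range m.toNat).foldl (fun g' i =>
      gset g' i j (if i < m.toNat - ((colA m.toNat g j).filter (fun x => x ≠ '/')).length then '/'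
        else ((colA m.toNat g j).filter (fun x => x ≠ '/')).getD
          (i - (m.toNat - ((colA m.toNat g j).filter (fun x => x ≠ '/')).length)) '/')) g) j = _
  rw [f2, foldl_set_eq_map _ _ m.toNat (length_colA ..),
    map_val_eq_compactL m.toNat (colA m.toNat g j) (length_colA ..)]

lemma dropColumns_fold_spec (m : Int) {N : Nat} :
    ∀ (js : List Nat), js.Nodup → (∀ j ∈ js, j < N) →
    ∀ g, GShape m.toNat N g →
      gshape (js.foldl (dcbody m) g) = gshape g ∧
      ∀ j, colA m.toNat (js.foldl (dcbody m) g) j =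
        if j ∈ js then compactL m.toNat (colA m.toNat g j) else colA m.toNat g j := by
  intro js
  induction js with
  | nil => intro _ _ g hg; exact ⟨rfl, fun j => by simp⟩
  | cons j0 js ih =>
    intro hnd hb g hg
    rw [List.nodup_cons] at hnd
    have hj0 : j0 < N := hb j0 List.mem_cons_self
    obtain ⟨d1, d2, d3⟩ := dcbody_spec m hj0 g hg
    obtain ⟨ihs, ihc⟩ := ih hnd.2 (fun j hj => hb j (List.mem_cons_of_mem _ hj)) (dcbody m g j0)
      (GShape_of_gshape_eq d1 hg)
    refine ⟨by rw [List.foldl_cons, ihs, d1], ?_⟩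
    intro j
    rw [List.foldl_cons, ihc j]
    by_cases hjj : j ∈ js
    · have hne : j ≠ j0 := fun e => hnd.1 (e ▸ hjj)
      rw [if_pos hjj, if_pos (List.mem_cons_of_mem _ hjj), d3 j hne]
    · rw [if_neg hjj]
      by_cases hj0j : j = j0
      · subst hj0j
        rw [if_pos List.mem_cons_self, d2]
      · rw [if_neg (by simp [hj0j, hjj]), d3 j hj0j]


-- ---------- gravity: the descending bubble pass compacts each column ----------

lemma cbubble_spec (m : Int) :
    ∀ (p : Nat) (a : List Char) (x : Char) (rest : List Char),
      x ≠ '/' → (rest = [] ∨ ∃ y ys, rest = y :: ys ∧ y ≠ '/') →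
      ((a.length + 1 + p + rest.length : Nat) : Int) = m →
      cbubble m (a ++ x :: (List.replicate p '/' ++ rest)) a.length (a.length + 1) =
        a ++ (List.replicate p '/' ++ x :: rest) := by
  intro p
  induction p with
  | zero =>
    intro a x rest hx hrest hm
    rw [cbubble]
    rcases hrest with hr | ⟨y, ys, hr, hy⟩
    · subst hr
      rw [dif_neg (by
        intro hcon
        have := hcon.1
        simp at hm
        omega)]
      simp
    · subst hr
      rw [dif_neg (by
        intro hcon
        have := hcon.2
        rw [List.getD_append_right _ _ _ _ (by omega)] at this
        simp at this
        exact hy this)]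
      simp
  | succ p ih =>
    intro a x rest hx hrest hm
    rw [cbubble]
    have hlen : ((a.length + 1 : Nat) : Int) < m := by
      simp at hm ⊢
      omega
    have hget1 : (a ++ x :: (List.replicate (p+1) '/' ++ rest)).getD (a.length + 1) '/' = '/' := by
      rw [List.getD_append_right _ _ _ _ (by omega)]
      have he : a.length + 1 - a.length = 1 := by omega
      rw [he, List.getD_cons_succ, List.replicate_succ, List.cons_append, List.getD_cons_zero]
    have hget0 : (a ++ x :: (List.replicate (p+1) '/' ++ rest)).getD a.length '/' = x := by
      rw [List.getD_append_right _ _ _ _ (by omega)]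
      simp
    rw [dif_pos ⟨hlen, hget1⟩, hget1, hget0]
    have h0 : a.length - a.length = 0 := by omega
    have h1 : a.length + 1 - a.length = 1 := by omega
    have hswap : ((a ++ x :: (List.replicate (p+1) '/' ++ rest)).set a.length '/').set
        (a.length + 1) x = (a ++ ['/']) ++ x :: (List.replicate p '/' ++ rest) := by
      rw [List.set_append, if_neg (by omega), h0, List.set_cons_zero,
          List.set_append, if_neg (by omega), h1, List.set_cons_succ,
          List.replicate_succ, List.cons_append, List.set_cons_zero]
      simp
    rw [hswap]
    have hcall := ih (a ++ ['/']) x rest hx hrest (by simp at hm ⊢; omega)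
    have hl : (a ++ ['/']).length = a.length + 1 := by simp
    rw [hl] at hcall
    rw [hcall]
    simp [List.replicate_succ]

lemma csuf_single (ch : Char) : csuf [ch] = [ch] := by
  by_cases h : ch = '/' <;> simp [csuf, h]

lemma colpass (m : Int) (M : Nat) (hm : (M : Int) = m) :
    ∀ (k t : Nat), t + k + 1 = M → ∀ c : List Char, c.length = M →
      ((List.range' t k).reverse).foldl (fun c i => stepC m i c) c =
        c.take t ++ csuf (c.drop t) := by
  intro k
  induction k with
  | zero =>
    intro t ht c hc
    have htM : t < M := by omega
    have hd : c.drop t = [c.getD t '/'] := by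
      rw [List.drop_eq_getElem_cons (by omega)]
      have h2 : c.drop (t+1) = [] :=
        List.eq_nil_of_length_eq_zero (by rw [List.length_drop]; omega)
      rw [h2, List.getD_eq_getElem _ _ (by omega)]
    simp only [List.range'_zero, List.reverse_nil, List.foldl_nil]
    rw [hd, csuf_single, ← hd, List.take_append_drop]
  | succ k ih =>
    intro t ht c hc
    have htM : t + 1 < M := by omega
    rw [List.range'_succ, List.reverse_cons, List.foldl_append]
    rw [ih (t+1) (by omega) c hc]
    simp only [List.foldl_cons, List.foldl_nil]
    set s := c.drop (t+1) with hs
    set f := s.filter (fun x => x ≠ '/') with hf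
    set ct := c.getD t '/' with hct
    have hslen : s.length = M - t - 1 := by rw [hs, List.length_drop, hc]; omega
    have hflen : f.length ≤ s.length := by rw [hf]; exact List.length_filter_le _ s
    have hs1 : 1 ≤ s.length := by omega
    set aP := s.length - f.length with haP
    have hdt : c.drop t = ct :: s := by
      rw [hs, List.drop_eq_getElem_cons (by omega), hct, List.getD_eq_getElem _ _ (by omega)]
    have hsome : getElem? c t = some ct := by
      rw [List.getElem?_eq_getElem (by omega), hct, List.getD_eq_getElem _ _ (by omega)]
    have htake : c.take (t+1) = c.take t ++ [ct] := by
      rw [List.take_add_one, hsome]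
      rfl
    have hc1 : c.take (t+1) ++ csuf s = (c.take t ++ [ct]) ++ (List.replicate aP '/' ++ f) := by
      rw [htake]
      rfl
    have htklen : (c.take t).length = t := by rw [List.length_take]; omega
    have hget_t : (c.take (t+1) ++ csuf s).getD t '/' = ct := by
      rw [hc1, List.getD_append _ _ _ _ (by simp [htklen]),
        List.getD_append_right _ _ _ _ (by omega), htklen]
      simp
    have hget_t1 : (c.take (t+1) ++ csuf s).getD (t+1) '/' =
        (List.replicate aP '/' ++ f).getD 0 '/' := by
      rw [hc1, List.getD_append_right _ _ _ _ (by simp [htklen])]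
      congr 1
      simp [htklen]
    unfold stepC
    rw [hget_t, hget_t1]
    by_cases hx : ct = '/'
    · rw [if_neg (by simp [hx])]
      rw [hc1, hdt]
      have hcs : csuf (ct :: s) = List.replicate (aP + 1) '/' ++ f := by
        unfold csuf
        rw [hx]
        have hfe : (('/' :: s).filter (fun x => x ≠ '/')) = f := by simp [hf]
        rw [hfe]
        congr 2
        simp
        omega
      rw [hcs, hx, List.replicate_succ]
      simp
    · by_cases hh : (List.replicate aP '/' ++ f).getD 0 '/' = '/'
      · have haP1 : 1 ≤ aP := by
          by_contra hcon
          have haP0 : aP = 0 := by omega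
          have hfne : f ≠ [] := by
            intro he
            have : f.length = 0 := by rw [he]; rfl
            omega
          obtain ⟨y, ys, hyy⟩ := List.exists_cons_of_ne_nil hfne
          rw [haP0] at hh
          simp only [List.replicate_zero, List.nil_append] at hh
          rw [hyy, List.getD_cons_zero] at hh
          have hymem : y ∈ f := by rw [hyy]; exact List.mem_cons_self
          rw [hf, List.mem_filter] at hymem
          simp [hh] at hymem
        rw [if_pos ⟨by simp [hx], hh⟩]
        have hrest : f = [] ∨ ∃ y ys, f = y :: ys ∧ y ≠ '/' := by
          cases hfc : f with
          | nil => exact Or.inl rfl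
          | cons y ys =>
            refine Or.inr ⟨y, ys, rfl, ?_⟩
            have hymem : y ∈ f := by rw [hfc]; exact List.mem_cons_self
            rw [hf, List.mem_filter] at hymem
            simpa using hymem.2
        have hassoc : c.take (t+1) ++ csuf s =
            c.take t ++ ct :: (List.replicate aP '/' ++ f) := by
          rw [hc1]
          simp
        rw [hassoc]
        have hcb := cbubble_spec m aP (c.take t) ct f hx hrest
          (by rw [htklen]; simp at hm ⊢; omega)
        rw [htklen] at hcb
        rw [hcb, hdt]
        have hcs : csuf (ct :: s) = List.replicate aP '/' ++ ct :: f := by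
          unfold csuf
          have hfil : ((ct :: s).filter (fun x => x ≠ '/')) = ct :: f := by simp [hf, hx]
          rw [hfil]
          congr 2
          simp
          omega
        rw [hcs]
      · rw [if_neg (by intro hcon; exact hh hcon.2)]
        have haP0 : aP = 0 := by
          by_contra hcon
          apply hh
          cases haa : aP with
          | zero => omega
          | succ a' => rw [List.replicate_succ, List.cons_append, List.getD_cons_zero]
        have hfs : f = s := by
          rw [hf]
          apply List.filter_eq_self.2
          exact List.length_filter_eq_length_iff.mp
            (show (s.filter (fun x => x ≠ '/')).length = s.length by rw [← hf]; omega)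
        rw [hc1, hdt]
        have hcs : csuf (ct :: s) = ct :: s := by
          unfold csuf
          have hfil : ((ct :: s).filter (fun x => x ≠ '/')) = ct :: f := by simp [hf, hx]
          rw [hfil]
          have hz : (ct :: s).length - (ct :: f).length = 0 := by
            simp
            omega
          rw [hz]
          simp [hfs]
        rw [hcs, haP0, hfs]
        simp


-- ---------- gravity pass equals the column rebuild ----------

lemma grav_eq_drop (m n : Int) (g : List (List Char)) (hg : GShape m.toNat n.toNat g)
    (hm2 : 2 ≤ m.toNat) : gravPass m n g = dropColumns m n g := by
  obtain ⟨hs1, hc1⟩ := grav_outer m n ((List.range (m-1).toNat).reverse) g hg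
  obtain ⟨hs2, hc2⟩ := dropColumns_fold_spec m (List.range n.toNat) List.nodup_range
    (fun j hj => List.mem_range.1 hj) g hg
  have hsg : gshape (gravPass m n g) = gshape g := hs1
  have hsd : gshape (dropColumns m n g) = gshape g := by rw [dropColumns_eq]; exact hs2
  have hmi : (m.toNat : Int) = m := by omega
  have hm1 : (m-1).toNat = m.toNat - 1 := by omega
  have hcols : ∀ j, colA m.toNat (gravPass m n g) j = colA m.toNat (dropColumns m n g) j := by
    intro j
    rw [dropColumns_eq]
    have hL : colA m.toNat (gravPass m n g) j =
        if j < n.toNat then ((List.range (m-1).toNat).reverse).foldl (fun c i => stepC m i c)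
          (colA m.toNat g j) else colA m.toNat g j := hc1 j
    have hR := hc2 j
    rw [hL, hR]
    by_cases hj : j < n.toNat
    · rw [if_pos hj, if_pos (List.mem_range.2 hj)]
      rw [hm1, List.range_eq_range']
      rw [colpass m m.toNat hmi (m.toNat - 1) 0 (by omega) (colA m.toNat g j) (length_colA ..)]
      rw [List.take_zero, List.drop_zero, List.nil_append,
        compactL_eq_csuf m.toNat (colA m.toNat g j) (length_colA ..)]
    · rw [if_neg hj, if_neg (by simpa using hj)]
  apply grid_eq_of_gget '/'
  · rw [hsg, hsd]
  · intro i j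
    rw [← colA_getD m.toNat _ j (by rw [length_of_gshape_eq hsg]; exact hg.1) i,
      ← colA_getD m.toNat _ j (by rw [length_of_gshape_eq hsd]; exact hg.1) i, hcols j]

-- ---------- the main loops ----------

lemma vshape_init (m n : Int) :
    VShape m.toNat n.toNat ((List.range m.toNat).map (fun _ => List.replicate n.toNat false)) := by
  constructor
  · simp
  · intro row hrow
    obtain ⟨i, _, rfl⟩ := List.mem_map.1 hrow
    simp

lemma vzero_init (m n : Int) (p : Nat × Nat) :
    gget false ((List.range m.toNat).map (fun _ => List.replicate n.toNat false)) p.1 p.2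
      = false := by
  have hmap : (List.range m.toNat).map (fun _ => List.replicate n.toNat false)
      = List.replicate m.toNat (List.replicate n.toNat false) := by simp
  unfold gget
  rw [hmap]
  by_cases h1 : p.1 < m.toNat
  · rw [List.getD_eq_getElem (List.replicate m.toNat (List.replicate n.toNat false)) [] (by rw [List.length_replicate]; omega), List.getElem_replicate]
    by_cases h2 : p.2 < n.toNat
    · rw [List.getD_eq_getElem _ _ (by rw [List.length_replicate]; omega)]
      exact List.getElem_replicate _
    · rw [List.getD_eq_getElem?_getD, List.getElem?_eq_none (by rw [List.length_replicate]; omega)]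
      rfl
  · rw [List.getD_eq_getElem?_getD (l := List.replicate m.toNat (List.replicate n.toNat false)),
      List.getElem?_eq_none (by rw [List.length_replicate]; omega)]
    rfl

lemma degenerate_matches (m n : Int) (g : List (List Char))
    (hd : (m-1).toNat = 0 ∨ (n-1).toNat = 0) : findMatches m n g = [] := by
  rw [findMatches_eq]
  rcases hd with h | h
  · rw [h, List.range_zero, List.foldl_nil]
    rfl
  · simp only [h, List.range_zero, List.foldl_nil]
    exact List.foldl_fixed _

lemma degenerate_mark (m n : Int) (g : List (List Char)) (v : List (List Bool))
    (hd : (m-1).toNat = 0 ∨ (n-1).toNat = 0) : markPass m n g v = v := by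
  unfold markPass
  rcases hd with h | h
  · rw [h, List.range_zero, List.foldl_nil]
  · simp only [h, List.range_zero, List.foldl_nil]
    exact List.foldl_fixed _

lemma loop_eq (m n : Int) :
    ∀ (fuel : Nat) (g : List (List Char)) (v : List (List Bool)) (ans : Int),
      GShape m.toNat n.toNat g → VShape m.toNat n.toNat v →
      (∀ p : Nat × Nat, gget false v p.1 p.2 = false) →
      loopA m n fuel g v ans = loopB m n fuel g ans := by
  intro fuel
  induction fuel with
  | zero => intros; rfl
  | succ fuel ih =>
    intro g v ans hg hv hz
    obtain ⟨hv', hrel', hS'⟩ := markPass_spec m n g v hv hz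
    have hcheck : checkDelete m (markPass m n g v) = (findMatches m n g).isEmpty :=
      checkDelete_eq m (markPass m n g v) (findMatches m n g) hv' hrel' hS'.2.1
    simp only [loopA, loopB]
    set S := findMatches m n g with hSdef
    by_cases hemp : S.isEmpty = true
    · rw [hcheck, hemp, if_pos rfl, if_pos rfl]
    · rw [Bool.not_eq_true] at hemp
      rw [hcheck, hemp, if_neg (by simp), if_neg (by simp)]
      have hne : S ≠ [] := List.isEmpty_eq_false_iff.mp hemp
      obtain ⟨hM2, hN2⟩ := hS'.2.2 hne
      -- the deletion pass
      have hranges : ∀ p ∈ boxPairs m.toNat n.toNat,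
          p.1 < g.length ∧ p.2 < (g.getD p.1 []).length ∧
          p.1 < (markPass m n g v).length ∧ p.2 < ((markPass m n g v).getD p.1 []).length := by
        intro p hp
        obtain ⟨hp1, hp2⟩ := mem_boxPairs.1 hp
        have hg1 : p.1 < g.length := by rw [hg.1]; exact hp1
        have hv1 : p.1 < (markPass m n g v).length := by rw [hv'.1]; exact hp1
        refine ⟨hg1, ?_, hv1, ?_⟩
        · have := hg.2 _ (getD_row_mem g p.1 hg1)
          omega
        · rw [hv'.2 _ (getD_row_mem _ p.1 hv1)]
          exact hp2
      obtain ⟨p1, p2, p3, p4, p5⟩ := pass1_spec (boxPairs m.toNat n.toNat)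
        (nodup_boxPairs m.toNat n.toNat) 0 g (markPass m n g v) hranges
      rw [runDelete, runDelete1_eq]
      set st := (boxPairs m.toNat n.toNat).foldl dstep (0, g, markPass m n g v) with hstdef
      -- the count
      have hcount : st.1 = (S.length : Int) := by
        rw [p1, List.countP_congr (fun q _ => by rw [hrel' q]),
          countP_mem_eq_length _ S (nodup_boxPairs ..) hS'.1
            (fun p hp => mem_boxPairs.2 (hS'.2.1 p hp))]
        omega
      -- the blanked grid
      have hblankrange : ∀ p ∈ S, p.1 < g.length ∧ p.2 < (g.getD p.1 []).length := by
        intro p hp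
        obtain ⟨hp1, hp2⟩ := hS'.2.1 p hp
        have hg1 : p.1 < g.length := by rw [hg.1]; exact hp1
        refine ⟨hg1, ?_⟩
        have := hg.2 _ (getD_row_mem g p.1 hg1)
        omega
      obtain ⟨b1, b2⟩ := blank_spec S g hblankrange
      have hgrid : st.2.1 = blankCells g S := by
        apply grid_eq_of_gget '/'
        · rw [p2, b1]
        · intro i j
          rw [p4 ⟨i, j⟩, b2 ⟨i, j⟩, hrel' ⟨i, j⟩]
          by_cases hin : (i, j) ∈ S
          · rw [if_pos hin, if_pos ⟨mem_boxPairs.2 (hS'.2.1 _ hin), by simp [hin]⟩]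
          · rw [if_neg hin]
            by_cases hbx : ((i, j) ∈ boxPairs m.toNat n.toNat ∧ decide ((i, j) ∈ S) = true)
            · exact absurd (of_decide_eq_true hbx.2) hin
            · rw [if_neg hbx]
      -- the reset visit matrix
      have hvsh : VShape m.toNat n.toNat st.2.2 :=
        VShape_of_gshape_eq p3 hv'
      have hvz : ∀ p : Nat × Nat, gget false st.2.2 p.1 p.2 = false := by
        intro p
        rw [p5 p, hrel' p]
        by_cases hin : p ∈ S
        · simp [mem_boxPairs.2 (hS'.2.1 p hin)]
        · simp [hin]
      -- gravity
      have hgsh : GShape m.toNat n.toNat st.2.1 :=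
        GShape_of_gshape_eq p2 hg
      have hgrav : gravPass m n st.2.1 = dropColumns m n st.2.1 :=
        grav_eq_drop m n st.2.1 hgsh hM2
      have hgsh2 : GShape m.toNat n.toNat (dropColumns m n st.2.1) :=
        GShape_of_gshape_eq (by rw [dropColumns_eq]; exact (dropColumns_fold_spec m _
          List.nodup_range (fun j hj => List.mem_range.1 hj) st.2.1 hgsh).1) hgsh
      rw [hgrav, hcount, hgrid]
      exact ih (dropColumns m n (blankCells g S)) st.2.2 (ans + (S.length : Int))
        (hgrid ▸ hgsh2) hvsh hvz

-- ===== VERDICT (by name: the statement is the Claim_ definition above) =====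
theorem solution_spec : Claim_equal_solution := by
  unfold Claim_equal_solution
  intro m n board _hdom hpre
  simp only [Spec_solution, solution, solution_alt]
  by_cases hMN : 2 ≤ m.toNat ∧ 2 ≤ n.toNat
  · refine loop_eq m n _ _ _ 0 ⟨by simp, ?_⟩ (vshape_init m n) (vzero_init m n)
    intro row hrow
    obtain ⟨i, hi, rfl⟩ := List.mem_map.1 hrow
    rw [List.mem_range] at hi
    have hlen : m.toNat ≤ board.length := by
      have := hpre.1
      omega
    have hib : i < board.length := by omega
    have hmem : board.getD i "" ∈ board.take m.toNat := by
      rw [List.getD_eq_getElem _ _ hib]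
      have he : board[i] = (board.take m.toNat)[i]'(by rw [List.length_take]; omega) :=
        List.getElem_take.symm
      rw [he]
      exact List.getElem_mem _
    have hns := hpre.2 (by omega) (by omega) _ hmem
    rw [PySem.Str.len_eq] at hns
    omega
  · have hd : (m-1).toNat = 0 ∨ (n-1).toNat = 0 := by omega
    simp only [loopA, loopB]
    rw [degenerate_mark m n _ _ hd,
      checkDelete_eq m _ [] (vshape_init m n) (fun p => by rw [vzero_init m n p]; simp)
        (by simp),
      degenerate_matches m n _ hd]
    simp
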